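-- pv_equiv track=rewrite | github.com/marieeliselat/McGill | Comp 202/Assignment 3/similarity_measures.py | get_semantic_descriptor
-- ===== SOURCE A (Python) =====
-- def get_semantic_descriptor(w, s):
--     '''
--     (str, list) -> dict
--     returns a dictionary representing the semantic descriptor vector of the
--     word w computed from the sentence s
--     >>> s1 = ['all', 'the', 'habits', 'of', 'man', 'are', 'evil']
--     >>> s2 = ['no', 'animal', 'must', 'ever', 'kill', 'any', 'other', 'animal']
--     >>> desc1 = get_semantic_descriptor('evil', s1)
--     >>> desc1['all']
--     1
--     >>> len(desc1)
--     6
--     >>> 'animal' in desc1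
--     False
--     >>> desc2 = get_semantic_descriptor('animal', s2)
--     >>> desc2 == {'no': 1, 'must': 1, 'ever': 1, 'kill': 1, 'any': 1, 'other': 1}
--     True
--     >>> get_semantic_descriptor('animal', s1)
--     {}
--     '''
--
--     d = {}
--
--     if w not in s: #if word not in string return empty dict
--         return d
--     else:
--         for i in s:#itrate through the list
--             if (i == w): #if the element is the same as the string , pass it
--                 continue
--             elif i in d: #if the element is already in d add 1
--                 d[i] += 1
--             else: #if not then it's equal to one
--                 d[i] = 1
--     return d
-- ===== SOURCE B (Python) =====
-- def get_semantic_descriptor(w, s):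
--     if w not in s:
--         return {}
--     return {x: s.count(x) for x in dict.fromkeys(s) if x != w}
-- ===== Notes on version B (the rewrite author's own statement) =====
-- stated objective: alternative
-- what changed: B has no counting accumulator at all: it enumerates the distinct words of s once (dict.fromkeys), filters out w, and computes each count by a separate full scan s.count(x), instead of A's single pass that skips w and increments a running dict.
import Mathlib
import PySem

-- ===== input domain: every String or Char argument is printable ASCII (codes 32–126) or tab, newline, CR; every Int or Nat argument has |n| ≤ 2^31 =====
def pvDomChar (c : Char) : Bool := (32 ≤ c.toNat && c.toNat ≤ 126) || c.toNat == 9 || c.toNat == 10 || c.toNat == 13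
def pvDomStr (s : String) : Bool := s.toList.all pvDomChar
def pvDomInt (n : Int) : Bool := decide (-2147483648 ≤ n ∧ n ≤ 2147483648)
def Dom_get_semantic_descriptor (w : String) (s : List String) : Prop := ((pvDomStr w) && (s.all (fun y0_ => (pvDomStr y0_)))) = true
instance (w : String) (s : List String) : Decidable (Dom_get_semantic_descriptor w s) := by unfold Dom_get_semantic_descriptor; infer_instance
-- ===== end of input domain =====

-- B drops A's running count dict entirely: it enumerates the distinct words (dict.fromkeys),
-- filters out w, and counts each word by its own full scan s.count(x) (objective: alternative).

-- ===== PORT A =====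
-- A: d = {}; if w not in s: return d; else loop with continue on w and d[i] += 1 / d[i] = 1.
def get_semantic_descriptor (w : String) (s : List String) : List (String × Int) :=
  let d : PySem.Dict String Int := PySem.Dict.empty
  if ¬ (w ∈ s) then d.items
  else
    (s.foldl (fun d i =>
      if i == w then d
      else if d.contains i then d.insert i (d.getD i 0 + 1)
      else d.insert i 1) d).items

-- ===== PORT B =====
-- B: guard, then the dict comprehension {x: s.count(x) for x in dict.fromkeys(s) if x != w},
-- ported as a fold of inserts over the filtered dedup list (exactly the comprehension's inserts).
def get_semantic_descriptor_alt (w : String) (s : List String) : List (String × Int) :=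
  if ¬ (w ∈ s) then ([] : List (String × Int))
  else
    (((PySem.List.dedup s).filter (fun x => x != w)).foldl
      (fun d x => d.insert x ((PySem.List.count s x : Int)))
      (PySem.Dict.empty : PySem.Dict String Int)).items

-- ===== PRECONDITION & SPEC =====
def Spec_get_semantic_descriptor (w : String) (s : List String) (out : List (String × Int)) : Prop := out = get_semantic_descriptor_alt w s
instance (w : String) (s : List String) (out : List (String × Int)) : Decidable (Spec_get_semantic_descriptor w s out) := by unfold Spec_get_semantic_descriptor; infer_instance

-- ===== CLAIM (what is proved, stated in full; the proofs are below) =====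
def Claim_equal_get_semantic_descriptor : Prop := ∀ (w : String) (s : List String), Dom_get_semantic_descriptor w s → Spec_get_semantic_descriptor w s (get_semantic_descriptor w s)

-- ===== LEMMAS AND PROOFS =====

-- A's loop equals the unconditional counting loop over s with the w-occurrences filtered out.
theorem pv_A_loop_eq_filter (w : String) :
    ∀ (l : List String) (d : PySem.Dict String Int),
      l.foldl (fun d i =>
          if i == w then d
          else if d.contains i then d.insert i (d.getD i 0 + 1)
          else d.insert i 1) d
        = (l.filter (fun i => !(i == w))).foldl
            (fun d i => d.insert i (d.getD i 0 + 1)) d := by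
  intro l
  induction l with
  | nil => intro d; rfl
  | cons i l ih =>
    intro d
    simp only [List.foldl_cons, List.filter_cons]
    by_cases hi : i = w
    · have h1 : (i == w) = true := by simp [hi]
      rw [if_pos h1]
      have h2 : (!(i == w)) = false := by simp [hi]
      rw [h2, if_neg (by simp)]
      exact ih d
    · have h1 : (i == w) = false := by simp [hi]
      rw [if_neg (by simp [h1])]
      have h2 : (!(i == w)) = true := by simp [hi]
      rw [h2, if_pos rfl, List.foldl_cons]
      by_cases hc : d.contains i = true
      · rw [if_pos hc]; exact ih _
      · have hz : d.getD i 0 = 0 :=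
          PySem.Dict.getD_of_not_contains d 0 (by simpa using hc)
        have hins : d.insert i 1 = d.insert i (d.getD i 0 + 1) := by
          rw [hz]; norm_num
        rw [if_neg hc, hins]
        exact ih _

-- filtering commutes with Python's ordered dedup (set-of-first-occurrences).
theorem pv_ofList_filter (p : String → Bool) (l : List String) :
    PySem.Set.ofList (l.filter p) = (PySem.Set.ofList l).filter p := by
  induction l using List.reverseRecOn with
  | nil => rfl
  | append_singleton l x ih =>
    rw [List.filter_append, PySem.Set.ofList_append_singleton]
    by_cases hp : p x = true
    · rw [show List.filter p [x] = [x] by simp [hp],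
          PySem.Set.ofList_append_singleton, ih]
      by_cases hm : x ∈ l
      · have h1 : x ∈ List.filter p (PySem.Set.ofList l) := by
          rw [List.mem_filter]
          refine ⟨?_, hp⟩
          rw [PySem.Set.mem_ofList]
          exact hm
        have h2 : x ∈ PySem.Set.ofList l := by
          rw [PySem.Set.mem_ofList]; exact hm
        rw [PySem.Set.add_of_mem h1, PySem.Set.add_of_mem h2]
      · have h1 : x ∉ List.filter p (PySem.Set.ofList l) := by
          rw [List.mem_filter]
          rintro ⟨h, _⟩
          exact hm (by rwa [PySem.Set.mem_ofList] at h)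
        have h2 : x ∉ PySem.Set.ofList l := fun h =>
          hm (by rwa [PySem.Set.mem_ofList] at h)
        rw [PySem.Set.add_of_not_mem h1, PySem.Set.add_of_not_mem h2,
            List.filter_append]
        simp [hp]
    · rw [show List.filter p [x] = [] by simp [hp], List.append_nil, ih]
      by_cases hm : x ∈ PySem.Set.ofList l
      · rw [PySem.Set.add_of_mem hm]
      · rw [PySem.Set.add_of_not_mem hm, List.filter_append]
        simp [hp]

-- ===== VERDICT (by name: the statement is the Claim_ definition above) =====
theorem get_semantic_descriptor_spec : Claim_equal_get_semantic_descriptor := by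
  intro w s _
  unfold Spec_get_semantic_descriptor get_semantic_descriptor get_semantic_descriptor_alt
  by_cases hm : w ∈ s
  · simp only [hm, not_true_eq_false, if_false]
    have hfold :
        (((PySem.List.dedup s).filter (fun x => x != w)).foldl
            (fun d x => d.insert x ((PySem.List.count s x : Int)))
            (PySem.Dict.empty : PySem.Dict String Int)).items
          = ((PySem.List.dedup s).filter (fun x => x != w)).map
              (fun x => (x, (PySem.List.count s x : Int))) := by
      simpa using
        PySem.Dict.items_foldl_insert_fresh
          (l := (PySem.List.dedup s).filter (fun x => x != w))
          (k := fun x => x) (v := fun x => (PySem.List.count s x : Int))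
          (d := (PySem.Dict.empty : PySem.Dict String Int))
          (by intro a _; exact PySem.Dict.contains_empty a)
          (by simpa using (PySem.List.nodup_dedup s).filter (fun x => x != w))
    rw [pv_A_loop_eq_filter w s PySem.Dict.empty,
        PySem.Dict.foldl_insert_getD_add_one_eq_counter,
        PySem.Dict.items_counter,
        pv_ofList_filter (fun i => !(i == w)) s, hfold]
    rw [show PySem.Set.ofList s = PySem.List.dedup s from
          (PySem.List.dedup_eq_ofList s).symm]
    have hsame : ((PySem.List.dedup s).filter (fun x => x != w))
        = ((PySem.List.dedup s).filter (fun i => !(i == w))) := by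
      simp [bne]
    rw [← hsame]
    apply List.map_congr_left
    intro k hk
    have hkw : ¬ k = w := by simpa using (List.mem_filter.mp hk).2
    have hcnt : (s.filter (fun i => !(i == w))).count k = s.count k := by
      rw [List.count_filter]
      simp [hkw]
    simp [PySem.List.count_eq, hcnt]
  · simp [hm, PySem.Dict.empty]
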